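-- pv_equiv track=rewrite | github.com/MacHu-GWU/AngoraIronPython | angora/STRING/formatmaster.py | sentence_formatter
-- ===== SOURCE A (Python) =====
-- def sentence_formatter(text):
--     """将字符串转换为首字母大写, 其他字母小写的, 非严格英文句子格式。单词之间的空格会被标准化为长度1。
--     注意: 一些国家, 名字之类的本应大写的单词可能会被转化成小写。
--     """
--     text = text.strip()
--     if len(text) == 0: # 如果是空字符串, 则依旧保留空字符串
--         return text
--     else:
--         text = text.lower()
--         # 按照空格拆分单词, 多个空格按一个空格对待
--         chunks = [chunk for chunk in text.split(" ") if len(chunk)>=1]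
--         chunks[0] = chunks[0][0].upper() + chunks[0][1:]
--         return " ".join(chunks)
-- ===== SOURCE B (Python) =====
-- def sentence_formatter(text):
--     s = text.strip()
--     if not s:
--         return s
--     out = []
--     prev_space = False
--     for ch in s.lower():
--         if ch == " ":
--             if not prev_space:
--                 out.append(" ")
--             prev_space = True
--         else:
--             out.append(ch)
--             prev_space = False
--     out[0] = out[0].upper()
--     return "".join(out)
-- ===== Notes on version B (the rewrite author's own statement) =====
-- stated objective: alternative
-- what changed: Replaced A's lower/split-on-space/filter/capitalize/join list pipeline by a single explicit character scan that collapses space runs with a previous-was-space flag and uppercases the first buffered character.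
import Mathlib
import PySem

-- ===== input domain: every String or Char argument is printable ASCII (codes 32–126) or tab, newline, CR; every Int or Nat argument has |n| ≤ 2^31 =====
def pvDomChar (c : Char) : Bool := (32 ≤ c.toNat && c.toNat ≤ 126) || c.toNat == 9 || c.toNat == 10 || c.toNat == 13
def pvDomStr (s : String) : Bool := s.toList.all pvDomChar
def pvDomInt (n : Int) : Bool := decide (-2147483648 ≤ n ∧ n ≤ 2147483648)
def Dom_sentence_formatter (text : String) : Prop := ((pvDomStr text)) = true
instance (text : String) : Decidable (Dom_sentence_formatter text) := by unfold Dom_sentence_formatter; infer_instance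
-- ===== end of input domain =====

-- B replaces A's split/filter/join list pipeline by one explicit character scan with a
-- previous-was-space flag (alternative decomposition, same cost; return values proved equal).

-- ===== PORT A =====
-- Literal transliteration of A: strip; if empty return it; lower; split(" "); keep the
-- nonempty chunks; chunks[0] = chunks[0][0].upper() + chunks[0][1:]; " ".join(chunks).
-- (chunks[0][0] is written as c0.take 1: after strip the first chunk is never empty — proved
-- in headD_filter_ne_nil below — so this is exact on every reachable input.)
def sentence_formatter (text : String) : String :=
  let t := PySem.Str.strip text
  if PySem.Str.len t = 0 then t
  else
    let t2 := PySem.Str.lower t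
    let chunks := (PySem.Chars.splitOn t2.toList [' ']).filter (fun c => 1 ≤ PySem.Chars.len c)
    let c0 := chunks.headD []
    let c0' := PySem.Chars.upper (c0.take 1) ++ c0.drop 1
    String.ofList (PySem.Chars.join [' '] (chunks.set 0 c0'))

-- ===== PORT B =====
-- B's loop: out-buffer + prev_space flag, collapsing space runs, emitting other chars.
def pvAltScan : List Char → Bool → List Char → List Char
  | [], _, out => out
  | ch :: rest, prev, out =>
    if ch = ' ' then pvAltScan rest true (if prev then out else out ++ [' '])
    else pvAltScan rest false (out ++ [ch])

def sentence_formatter_alt (text : String) : String :=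
  let s := PySem.Str.strip text
  if s.toList = [] then s
  else
    let out := pvAltScan (PySem.Chars.lower s.toList) false []
    String.ofList (PySem.Chars.upper (out.take 1) ++ out.drop 1)  -- out[0] = out[0].upper()

-- ===== PRECONDITION & SPEC =====
def Spec_sentence_formatter (text : String) (out : String) : Prop := out = sentence_formatter_alt text
instance (text : String) (out : String) : Decidable (Spec_sentence_formatter text out) := by unfold Spec_sentence_formatter; infer_instance

-- ===== CLAIM (what is proved, stated in full; the proofs are below) =====
def Claim_equal_sentence_formatter : Prop := ∀ (text : String), Dom_sentence_formatter text → Spec_sentence_formatter text (sentence_formatter text)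

-- ===== LEMMAS AND PROOFS =====

-- Reference recursion for Python's split(" "): chunks between single spaces.
def splitSp : List Char → List (List Char)
  | [] => [[]]
  | c :: r => if c = ' ' then [] :: splitSp r else (splitSp r).modifyHead (c :: ·)

-- Pure (non-accumulator) form of B's scan.
def scanPure : List Char → Bool → List Char
  | [], _ => []
  | c :: r, prev =>
    if c = ' ' then (if prev then scanPure r true else ' ' :: scanPure r true)
    else c :: scanPure r false

-- A's join-of-nonempty-chunks, the common normal form.
def joinW (cs : List Char) : List Char :=
  PySem.Chars.join [' '] ((splitSp cs).filter (fun c => decide (1 ≤ (c.length : Int))))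

theorem go_eq (l : List Char) : ∀ (fuel : Nat) (cur : List Char) (acc : List (List Char)),
    l.length < fuel →
    PySem.Chars.splitOn.go [' '] fuel l cur acc
      = acc.reverse ++ (splitSp l).modifyHead (cur.reverse ++ ·) := by
  induction l with
  | nil =>
    intro fuel cur acc h
    match fuel, h with
    | fuel+1, _ => simp [PySem.Chars.splitOn.go, splitSp]
  | cons c rest ih =>
    intro fuel cur acc h
    match fuel, h with
    | fuel+1, h =>
      rw [PySem.Chars.splitOn.go]
      by_cases hc : c = ' '
      · subst hc
        have hp : ([' '].isPrefixOf (' ' :: rest)) = true := by simp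
        rw [if_pos hp]
        rw [show List.drop [' '].length (' ' :: rest) = rest from rfl]
        rw [ih fuel [] _ (by simpa using h)]
        simp only [splitSp]
        cases hsp : splitSp rest <;> simp [List.modifyHead]
      · have hp : ([' '].isPrefixOf (c :: rest)) = false := by
          show ((' ' == c) && (List.isPrefixOf [] rest)) = false
          simp [beq_eq_false_iff_ne]; exact fun e => hc e.symm
        rw [if_neg (by simp [hp])]
        rw [ih fuel (c :: cur) acc (by simpa using h)]
        simp only [splitSp, if_neg hc]
        cases hsp : splitSp rest with
        | nil => simp
        | cons h t => simp [List.modifyHead]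

theorem splitOn_eq (cs : List Char) : PySem.Chars.splitOn cs [' '] = splitSp cs := by
  rw [PySem.Chars.splitOn, go_eq cs (cs.length+1) [] [] (by omega)]
  cases h : splitSp cs <;> simp [List.modifyHead]

theorem splitSp_ne_nil (cs : List Char) : splitSp cs ≠ [] := by
  cases cs with
  | nil => simp [splitSp]
  | cons c r =>
    simp only [splitSp]
    split
    · simp
    · cases h : splitSp r with
      | nil => exact absurd h (splitSp_ne_nil r)
      | cons a b => simp [List.modifyHead]

theorem altScan_eq (cs : List Char) : ∀ (prev : Bool) (out : List Char),
    pvAltScan cs prev out = out ++ scanPure cs prev := by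
  induction cs with
  | nil => intro prev out; simp [pvAltScan, scanPure]
  | cons c r ih =>
    intro prev out
    by_cases hc : c = ' '
    · subst hc
      cases prev <;> simp [pvAltScan, scanPure, ih]
    · simp [pvAltScan, scanPure, hc, ih]

theorem scan_prefix (w : List Char) (rest : List Char) (hw : ∀ c ∈ w, c ≠ ' ') :
    scanPure (w ++ rest) false = w ++ scanPure rest false := by
  induction w with
  | nil => simp
  | cons c w' ih =>
    have hc : c ≠ ' ' := hw c (by simp)
    simp only [List.cons_append, scanPure, if_neg hc]
    rw [ih (fun c hc' => hw c (by simp [hc']))]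

theorem splitSp_prefix (w : List Char) (rest : List Char) (hw : ∀ c ∈ w, c ≠ ' ') :
    splitSp (w ++ rest) = (splitSp rest).modifyHead (w ++ ·) := by
  induction w with
  | nil =>
    cases h : splitSp rest <;> simp [List.modifyHead, h]
  | cons c w' ih =>
    have hc : c ≠ ' ' := hw c (by simp)
    simp only [List.cons_append, splitSp, if_neg hc]
    rw [ih (fun c hc' => hw c (by simp [hc']))]
    cases h : splitSp rest <;> simp [List.modifyHead]

theorem filter_splitSp_ne_nil (cs : List Char) (h0 : cs ≠ [])
    (hl : cs.getLast? ≠ some ' ') :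
    (splitSp cs).filter (fun c => decide (1 ≤ (c.length : Int))) ≠ [] := by
  induction cs with
  | nil => exact absurd rfl h0
  | cons c r ih =>
    by_cases hc : c = ' '
    · subst hc
      cases r with
      | nil => simp at hl
      | cons a b =>
        simp only [splitSp]
        have := ih (by simp) (by rwa [List.getLast?_cons_cons] at hl)
        simpa using this
    · simp only [splitSp, if_neg hc]
      cases hsp : splitSp r with
      | nil => exact absurd hsp (splitSp_ne_nil r)
      | cons a b =>
        simp [List.modifyHead]

-- Single-space join of a cons.
theorem join_cons (x : List Char) (xs : List (List Char)) :
    PySem.Chars.join [' '] (x :: xs)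
      = x ++ (if xs = [] then [] else ' ' :: PySem.Chars.join [' '] xs) := by
  cases xs with
  | nil => simp [PySem.Chars.join_singleton]
  | cons y t => rw [PySem.Chars.join_cons_cons]; simp

-- Main invariant: on a string with no trailing space, B's scan equals A's
-- join-of-nonempty-chunks (started with prev_space = true, or = false if no leading space).
theorem scan_eq_joinW : ∀ (n : Nat) (cs : List Char), cs.length ≤ n →
    cs.getLast? ≠ some ' ' →
    (scanPure cs true = joinW cs ∧ (cs.head? ≠ some ' ' → scanPure cs false = joinW cs)) := by
  intro n
  induction n with
  | zero =>
    intro cs hlen _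
    have h0 : cs = [] := List.eq_nil_of_length_eq_zero (Nat.le_zero.mp hlen)
    subst h0
    exact ⟨by simp [scanPure, joinW, splitSp, PySem.Chars.join_nil],
           fun _ => by simp [scanPure, joinW, splitSp, PySem.Chars.join_nil]⟩
  | succ n ih =>
    intro cs hlen hlast
    cases cs with
    | nil =>
      exact ⟨by simp [scanPure, joinW, splitSp, PySem.Chars.join_nil],
             fun _ => by simp [scanPure, joinW, splitSp, PySem.Chars.join_nil]⟩
    | cons c cr =>
      by_cases hc : c = ' '
      · subst hc
        have hcr : cr ≠ [] := by rintro rfl; simp at hlast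
        have hlast' : cr.getLast? ≠ some ' ' := by
          cases cr with
          | nil => exact absurd rfl hcr
          | cons a b => rwa [List.getLast?_cons_cons] at hlast
        have hT := (ih cr (by simpa using hlen) hlast').1
        refine ⟨?_, ?_⟩
        · show (if (true : Bool) then scanPure cr true else ' ' :: scanPure cr true) = _
          rw [if_pos rfl, hT]
          simp [joinW, splitSp]
        · intro hh; simp at hh
      · have key : scanPure (c :: cr) false = joinW (c :: cr) := by
          have hsplit : c :: cr
              = (c :: cr.takeWhile (fun d => !(d == ' '))) ++ cr.dropWhile (fun d => !(d == ' ')) := by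
            simp [List.takeWhile_append_dropWhile]
          have hw : ∀ d ∈ c :: cr.takeWhile (fun d => !(d == ' ')), d ≠ ' ' := by
            intro d hd
            rcases List.mem_cons.mp hd with h | h
            · exact h ▸ hc
            · have := List.mem_takeWhile_imp h
              simpa using this
          rw [hsplit, scan_prefix _ _ hw]
          cases hrest : cr.dropWhile (fun d => !(d == ' ')) with
          | nil =>
            have h1 := splitSp_prefix (c :: cr.takeWhile (fun d => !(d == ' '))) [] hw
            unfold joinW
            rw [h1]
            simp [scanPure, splitSp, List.modifyHead, PySem.Chars.join_singleton]
          | cons r0 r' =>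
            have hne : cr.dropWhile (fun d => !(d == ' ')) ≠ [] := by simp [hrest]
            have hr0 : r0 = ' ' := by
              have h := List.head_dropWhile_not (fun d => !(d == ' ')) hne
              simp [hrest] at h
              exact h
            subst hr0
            have hlastcs := hlast
            rw [hsplit, hrest] at hlastcs
            have hr' : r' ≠ [] := by
              rintro rfl
              exact hlastcs (by rw [List.getLast?_append_of_ne_nil _ (by simp)]; rfl)
            have hlastr' : r'.getLast? ≠ some ' ' := by
              rw [List.getLast?_append_of_ne_nil _ (by simp)] at hlastcs
              cases r' with
              | nil => exact absurd rfl hr'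
              | cons a b => rwa [List.getLast?_cons_cons] at hlastcs
            have hlenr' : r'.length ≤ n := by
              have h2 := hlen
              rw [hsplit, hrest] at h2
              simp at h2
              omega
            have hTr' := (ih r' hlenr' hlastr').1
            have hscan : scanPure (' ' :: r') false = ' ' :: scanPure r' true := by
              simp [scanPure]
            rw [hscan, hTr']
            unfold joinW
            rw [splitSp_prefix _ _ hw]
            have hsp2 : splitSp (' ' :: r') = [] :: splitSp r' := by simp [splitSp]
            rw [hsp2]
            simp only [List.modifyHead, List.append_nil]
            rw [List.filter_cons_of_pos (by simp)]
            rw [join_cons]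
            rw [if_neg (filter_splitSp_ne_nil r' hr' hlastr')]
        refine ⟨?_, fun _ => key⟩
        show (if c = ' ' then _ else c :: scanPure cr false) = _
        rw [if_neg hc]
        have : scanPure (c :: cr) false = c :: scanPure cr false := by
          show (if c = ' ' then _ else c :: scanPure cr false) = _
          rw [if_neg hc]
        rw [← this, key]

theorem lowerChar_eq_space_iff (c : Char) : PySem.Chars.lowerChar c = ' ' ↔ c = ' ' := by
  unfold PySem.Chars.lowerChar
  split_ifs with h
  · simp only [PySem.Chars.isupper, Bool.and_eq_true, decide_eq_true_eq] at h
    have h1 : 65 ≤ c.toNat := Char.le_def.mp h.1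
    have h2 : c.toNat ≤ 90 := Char.le_def.mp h.2
    constructor
    · intro he
      exfalso
      have hv : (c.toNat + 32).isValidChar := Or.inl (by omega)
      have : (Char.ofNat (c.toNat + 32)).toNat = ' '.toNat := by rw [he]
      rw [Char.toNat_ofNat, if_pos hv] at this
      have : ' '.toNat = 32 := by decide
      omega
    · intro he; subst he; exact absurd h1 (by decide)
  · exact Iff.rfl



theorem head?_dropWhile_false (p : Char → Bool) (l : List Char) (c : Char)
    (h : (l.dropWhile p).head? = some c) : p c = false := by
  have hne : l.dropWhile p ≠ [] := by intro h0; rw [h0] at h; simp at h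
  have h1 := List.head_dropWhile_not p hne
  rwa [show (l.dropWhile p).head hne = c from by
    have := List.head?_eq_some_head hne; rw [h] at this; exact (Option.some_inj.mp this).symm] at h1

theorem strip_head_not_space (x : List Char) (c : Char)
    (h : (PySem.Chars.strip x).head? = some c) : PySem.Chars.isspace c = false := by
  have hpre : PySem.Chars.strip x <+: x.dropWhile PySem.Chars.isspace := by
    unfold PySem.Chars.strip PySem.Chars.rstrip PySem.Chars.lstrip
    have := List.dropWhile_suffix (l := (x.dropWhile PySem.Chars.isspace).reverse)
      (p := PySem.Chars.isspace)
    simpa using List.reverse_prefix.mpr this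
  obtain ⟨tl, htl⟩ := hpre
  apply head?_dropWhile_false PySem.Chars.isspace x c
  rw [← htl]
  cases hs : PySem.Chars.strip x with
  | nil => rw [hs] at h; simp at h
  | cons a b => rw [hs] at h; simp at h ⊢; exact h

theorem strip_last_not_space (x : List Char) (c : Char)
    (h : (PySem.Chars.strip x).getLast? = some c) : PySem.Chars.isspace c = false := by
  unfold PySem.Chars.strip PySem.Chars.rstrip at h
  rw [List.getLast?_reverse] at h
  exact head?_dropWhile_false _ _ _ h

-- ===== VERDICT (by name: the statement is the Claim_ definition above) =====
theorem sentence_formatter_spec : Claim_equal_sentence_formatter := by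
  intro text _
  unfold Spec_sentence_formatter sentence_formatter sentence_formatter_alt
  simp only [PySem.Str.len, PySem.Str.strip, PySem.Str.lower, String.toList_ofList]
  set u := PySem.Chars.strip text.toList with hu
  by_cases h0 : u = []
  · simp [h0]
  · rw [if_neg (by simpa using h0), if_neg h0]
    set L := PySem.Chars.lower u with hL
    have hL0 : L ≠ [] := by simpa [hL, PySem.Chars.lower] using h0
    have hhead : L.head? ≠ some ' ' := by
      intro hcon
      rw [hL, PySem.Chars.lower, List.head?_map] at hcon
      cases hu0 : u.head? with
      | none => rw [hu0] at hcon; simp at hcon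
      | some c =>
        rw [hu0] at hcon
        simp only [Option.map_some, Option.some_inj] at hcon
        have hc : c = ' ' := (lowerChar_eq_space_iff c).mp hcon
        have := strip_head_not_space text.toList c (hu ▸ hu0)
        rw [hc] at this
        exact absurd this (by decide)
    have hlast : L.getLast? ≠ some ' ' := by
      intro hcon
      rw [hL, PySem.Chars.lower, List.getLast?_map] at hcon
      cases hu0 : u.getLast? with
      | none => rw [hu0] at hcon; simp at hcon
      | some c =>
        rw [hu0] at hcon
        simp only [Option.map_some, Option.some_inj] at hcon
        have hc : c = ' ' := (lowerChar_eq_space_iff c).mp hcon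
        have := strip_last_not_space text.toList c (hu ▸ hu0)
        rw [hc] at this
        exact absurd this (by decide)
    -- B's buffer is A's join of the nonempty chunks
    have hpred : (fun c => decide (1 ≤ PySem.Chars.len c))
        = (fun c : List Char => decide (1 ≤ (c.length : Int))) := by
      funext c; rw [PySem.Chars.len_eq]
    have hout : pvAltScan L false [] = joinW L := by
      rw [altScan_eq, List.nil_append]
      exact (scan_eq_joinW L.length L le_rfl hlast).2 (by
        cases hL' : L.head? with
        | none => simp
        | some c => intro hcc; exact hhead (hL' ▸ hcc))
    rw [hout]
    rw [splitOn_eq, hpred]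
    have hch : (splitSp L).filter (fun c : List Char => decide (1 ≤ (c.length : Int))) ≠ [] :=
      filter_splitSp_ne_nil L hL0 hlast
    cases hchunks : (splitSp L).filter (fun c : List Char => decide (1 ≤ (c.length : Int))) with
    | nil => exact absurd hchunks hch
    | cons c0 ct =>
      have hc0 : c0 ≠ [] := by
        have : c0 ∈ (splitSp L).filter (fun c : List Char => decide (1 ≤ (c.length : Int))) := by
          rw [hchunks]; simp
        have := List.of_mem_filter this
        simp at this
        intro h; rw [h] at this; simp at this
      cases hc0' : c0 with
      | nil => exact absurd hc0' hc0
      | cons d ds =>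
        unfold joinW
        rw [hchunks, hc0']
        simp only [List.headD_cons, List.set_cons_zero]
        rw [join_cons, join_cons]
        simp [PySem.Chars.upper]
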